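-- pv_equiv track=rewrite | github.com/aga-siwek/python_boring_stuff | ch06_manipulationing_string/task_table_printer_aga.py | max_wight_for_the_column
-- ===== SOURCE A (Python) =====
-- def max_wight_for_the_column(table_len):
--     num = len(table_len[0])-1
--     max_column = []
--
--     while num >= 0: #we selected the number in column.
--         column_width = [list[num] for list in table_len]
--         max_column.insert(0, max(column_width)) #becouse we use number from the bigger value to the 0, we add new value on the beggining on the list
--         num -= 1
--
--     return max_column
-- ===== SOURCE B (Python) =====
-- def max_wight_for_the_column(table_len):
--     max_column = list(table_len[0])
--     for row in table_len[1:]: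
--         for i in range(len(max_column)):
--             max_column[i] = max(max_column[i], row[i])
--     return max_column
-- ===== Notes on version B (the rewrite author's own statement) =====
-- stated objective: alternative
-- what changed: Replaces A's column-major traversal (one inner pass over all rows per column, building the result by insert(0,...)) with a single row-major pass that maintains a running per-column maximum seeded from a copy of the first row.
import Mathlib
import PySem

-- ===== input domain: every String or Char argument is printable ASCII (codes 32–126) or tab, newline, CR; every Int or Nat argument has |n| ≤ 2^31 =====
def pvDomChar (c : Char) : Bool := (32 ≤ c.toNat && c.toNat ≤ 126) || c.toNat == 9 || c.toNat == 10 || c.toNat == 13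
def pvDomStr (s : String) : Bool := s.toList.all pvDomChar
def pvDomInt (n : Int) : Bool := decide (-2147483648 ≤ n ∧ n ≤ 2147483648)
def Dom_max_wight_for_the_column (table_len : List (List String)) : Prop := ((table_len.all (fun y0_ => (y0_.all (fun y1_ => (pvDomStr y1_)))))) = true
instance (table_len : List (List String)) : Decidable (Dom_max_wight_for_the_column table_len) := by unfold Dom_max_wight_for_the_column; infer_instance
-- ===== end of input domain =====

-- B replaces A's column-major traversal with a single row-major pass keeping a running per-column maximum (alternative decomposition, same cost).


-- ===== PORT A =====
-- A's while loop: num runs from len(table_len[0])-1 down to 0; fuel n+1 means num = n.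
-- list[num] is PySem.List.pyGet?; the default "" / [] is never reached under Pre_.
def pvALoop (table : List (List String)) : Nat → List String → List String
  | 0, acc => acc
  | n + 1, acc =>
      let column_width := table.map (fun r => (PySem.List.pyGet? r (n : Int)).getD "")
      pvALoop table n (((PySem.List.max? column_width (fun y => y)).getD "") :: acc)

def max_wight_for_the_column (table_len : List (List String)) : List String :=
  pvALoop table_len ((PySem.List.pyGet? table_len 0).getD []).length []

-- ===== PORT B =====
-- one row-update: for i in range(len(max_column)): max_column[i] = max(max_column[i], row[i])
def pvBStep (acc row : List String) : List String :=
  acc.mapIdx (fun i a => max a ((PySem.List.pyGet? row (i : Int)).getD ""))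

def max_wight_for_the_column_alt (table_len : List (List String)) : List String :=
  (table_len.drop 1).foldl pvBStep ((PySem.List.pyGet? table_len 0).getD [])

-- ===== PRECONDITION & SPEC =====
-- Pre_ excludes exactly the inputs on which the Python A raises IndexError:
-- an empty table (table_len[0]) or a row shorter than the first row (list[num]).
def Pre_max_wight_for_the_column (table_len : List (List String)) : Prop :=
  table_len ≠ [] ∧ ∀ r ∈ table_len, (table_len.headD []).length ≤ r.length

instance (table_len : List (List String)) : Decidable (Pre_max_wight_for_the_column table_len) := by
  unfold Pre_max_wight_for_the_column; infer_instance

def pvWitness_max_wight_for_the_column : List (List String) := [["ab", "c"], ["zz", "a!"]]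

def Spec_max_wight_for_the_column (table_len : List (List String)) (out : List String) : Prop := out = max_wight_for_the_column_alt table_len
instance (table_len : List (List String)) (out : List String) : Decidable (Spec_max_wight_for_the_column table_len out) := by unfold Spec_max_wight_for_the_column; infer_instance

-- ===== CLAIM (what is proved, stated in full; the proofs are below) =====
def Claim_equal_max_wight_for_the_column : Prop := ∀ (table_len : List (List String)), Dom_max_wight_for_the_column table_len → Pre_max_wight_for_the_column table_len → Spec_max_wight_for_the_column table_len (max_wight_for_the_column table_len)

-- ===== LEMMAS AND PROOFS =====

-- element i of a row, as both ports read it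
def pvG (r : List String) (i : Nat) : String := (PySem.List.pyGet? r (i : Int)).getD ""

-- running column-i maximum over a list of rows
def pvF (rows : List (List String)) (x : String) (i : Nat) : String :=
  rows.foldl (fun m r => max m (pvG r i)) x

theorem pvALoop_eq (table : List (List String)) :
    ∀ (n : Nat) (acc : List String),
      pvALoop table n acc =
        ((List.range n).map (fun (i : Nat) =>
          ((PySem.List.max? (table.map (fun r => (PySem.List.pyGet? r (i : Int)).getD ""))
            (fun y => y)).getD ""))) ++ acc := by
  intro n
  induction n with
  | zero => intro acc; simp [pvALoop]
  | succ n ih =>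
      intro acc
      simp [pvALoop, ih, List.range_succ]

theorem pvColMax (first : List String) (rest : List (List String)) (i : Nat) :
    ((PySem.List.max? ((first :: rest).map (fun r => (PySem.List.pyGet? r (i : Int)).getD ""))
      (fun y => y)).getD "") = pvF rest (pvG first i) i := by
  simp [PySem.List.max?_id_cons, pvF, pvG, List.foldl_map]

theorem pvBStep_length (acc row : List String) : (pvBStep acc row).length = acc.length := by
  simp [pvBStep]

theorem pvBStep_getD (acc row : List String) (i : Nat) (h : i < acc.length) :
    (pvBStep acc row).getD i "" = max (acc.getD i "") (pvG row i) := by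
  simp [pvBStep, pvG, List.getD, h, List.getElem_mapIdx]

theorem pvFold_eq (rest : List (List String)) :
    ∀ (acc : List String),
      rest.foldl pvBStep acc =
        (List.range acc.length).map (fun i => pvF rest (acc.getD i "") i) := by
  induction rest with
  | nil =>
      intro acc
      apply List.ext_getElem
      · simp
      · intro i h1 h2
        have h1' : i < acc.length := by simpa using h1
        simp only [List.foldl_nil, List.getElem_map, List.getElem_range, pvF]
        simp [List.getD, List.getElem?_eq_getElem h1']
  | cons r rs ih =>
      intro acc
      have hlen : (pvBStep acc r).length = acc.length := pvBStep_length acc r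
      calc (r :: rs).foldl pvBStep acc
          = rs.foldl pvBStep (pvBStep acc r) := rfl
        _ = (List.range (pvBStep acc r).length).map
              (fun i => pvF rs ((pvBStep acc r).getD i "") i) := ih _
        _ = (List.range acc.length).map (fun i => pvF (r :: rs) (acc.getD i "") i) := by
              rw [hlen]
              apply List.map_congr_left
              intro i hi
              rw [pvBStep_getD acc r i (List.mem_range.mp hi)]
              simp [pvF]

-- ===== VERDICT (by name: the statement is the Claim_ definition above) =====
theorem max_wight_for_the_column_spec : Claim_equal_max_wight_for_the_column := by
  intro table_len _ _
  unfold Spec_max_wight_for_the_column max_wight_for_the_column max_wight_for_the_column_alt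
  cases table_len with
  | nil => simp [pvALoop, PySem.List.pyGet?]
  | cons first rest =>
      have h0 : (PySem.List.pyGet? (first :: rest) 0).getD [] = first := by
        simp [PySem.List.pyGet?, PySem.List.pyIdx?]
      rw [h0, pvALoop_eq, pvFold_eq, List.append_nil]
      apply List.map_congr_left
      intro i hi
      rw [pvColMax]
      congr 1
      have hi' := List.mem_range.mp hi
      simp [pvG, List.getD, List.getElem?_eq_getElem hi']
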